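-- pv_equiv track=rewrite | github.com/yellow3333/holdem | officialAutoAI/OC_AutoAImodel.py | count_continuous_faces
-- ===== SOURCE A (Python) =====
-- def count_continuous_faces(cards):
--     faces = set(card['face'] for card in cards)
--     continuous_count = 0
--     max_continuous_count = 0
--     previous_face = None
--
--     for face in sorted(faces):
--         if previous_face is not None and face - previous_face == 1:
--             continuous_count += 1
--         else:
--             continuous_count = 1
--         max_continuous_count = max(max_continuous_count, continuous_count)
--
--         previous_face = face
--     return max_continuous_count
-- ===== SOURCE B (Python) =====
-- def count_continuous_faces(cards):
--     faces = set(card['face'] for card in cards)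
--     best = 0
--     for face in faces:
--         if face - 1 not in faces:
--             length = 1
--             while face + length in faces:
--                 length += 1
--             best = max(best, length)
--     return best
-- ===== Notes on version B (the rewrite author's own statement) =====
-- stated objective: faster
-- what changed: Replaces sort-the-distinct-faces-then-scan-adjacent-pairs with hash-set run extension: for each face whose predecessor is absent (a run start) walk upward through the set, taking the longest walk.
import Mathlib
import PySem

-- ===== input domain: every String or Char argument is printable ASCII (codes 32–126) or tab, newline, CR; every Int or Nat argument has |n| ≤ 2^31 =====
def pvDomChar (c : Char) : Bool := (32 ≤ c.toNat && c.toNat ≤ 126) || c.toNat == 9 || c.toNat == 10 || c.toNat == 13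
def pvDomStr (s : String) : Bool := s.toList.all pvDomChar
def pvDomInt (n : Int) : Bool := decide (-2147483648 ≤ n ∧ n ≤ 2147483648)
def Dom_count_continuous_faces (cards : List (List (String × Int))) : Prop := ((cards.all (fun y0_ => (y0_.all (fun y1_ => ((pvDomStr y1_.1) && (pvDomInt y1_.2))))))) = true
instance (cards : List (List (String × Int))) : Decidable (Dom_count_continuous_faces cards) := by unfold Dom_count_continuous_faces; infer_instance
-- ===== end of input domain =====

-- B replaces A's sort-then-adjacent-scan with set-membership run extension from detected
-- run starts (faster by the removal of the sort); return values only, nothing is mutated.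

-- ===== PORT A =====
-- card['face'] (both Pythons do this identically); the .getD 0 default is only reached
-- outside Pre_count_continuous_faces (where Python raises KeyError).
def pvFace (card : List (String × Int)) : Int :=
  ((PySem.Dict.ofList card).get? "face").getD 0

def count_continuous_faces (cards : List (List (String × Int))) : Int :=
  let faces : PySem.Set Int := PySem.Set.ofList (cards.map pvFace)
  let fin := (PySem.List.sorted faces (fun x => x)).foldl
    (fun (st : Int × Int × Option Int) face =>
      let cc : Int := match st.2.2 with
        | some prev => if face - prev = 1 then st.1 + 1 else 1
        | none => 1
      (cc, max st.2.1 cc, some face))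
    (0, 0, none)
  fin.2.1

-- ===== PORT B =====
-- the 'while face + length in faces' loop; fuel = faces.length always suffices
-- (proved below: an upward run inside the duplicate-free list faces has at most
-- faces.length members).
def pvExtend (faces : List Int) : Nat → Int → Int → Int
  | 0, _, length => length
  | fuel + 1, face, length =>
      if face + length ∈ faces then pvExtend faces fuel face (length + 1) else length

def count_continuous_faces_alt (cards : List (List (String × Int))) : Int :=
  let faces : PySem.Set Int := PySem.Set.ofList (cards.map pvFace)
  faces.foldl
    (fun best face =>
      if face - 1 ∉ faces then max best (pvExtend faces faces.length face 1) else best)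
    0

-- ===== PRECONDITION & SPEC =====
-- Pre_ excludes exactly the inputs on which card['face'] raises KeyError (in A and B alike).
def Pre_count_continuous_faces (cards : List (List (String × Int))) : Prop :=
  ∀ card ∈ cards, (PySem.Dict.ofList card).contains "face" = true
instance (cards : List (List (String × Int))) : Decidable (Pre_count_continuous_faces cards) := by
  unfold Pre_count_continuous_faces; infer_instance

def pvWitness_count_continuous_faces : (List (List (String × Int))) :=
  [[("face", 5)], [("face", 7), ("suit", 1)], [("face", 6)], [("face", 5)]]

def Spec_count_continuous_faces (cards : List (List (String × Int))) (out : Int) : Prop := out = count_continuous_faces_alt cards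
instance (cards : List (List (String × Int))) (out : Int) : Decidable (Spec_count_continuous_faces cards out) := by unfold Spec_count_continuous_faces; infer_instance

-- ===== CLAIM (what is proved, stated in full; the proofs are below) =====
def Claim_equal_count_continuous_faces : Prop := ∀ (cards : List (List (String × Int))), Dom_count_continuous_faces cards → Pre_count_continuous_faces cards → Spec_count_continuous_faces cards (count_continuous_faces cards)

-- ===== LEMMAS AND PROOFS =====

theorem filt_lt_down (S : List Int) (x : Int) (h : x ∈ S) :
    (S.filter (fun y => decide (y ≤ x - 1))).length < (S.filter (fun y => decide (y ≤ x))).length := by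
  have h1 : S.filter (fun y => decide (y ≤ x - 1)) =
      (S.filter (fun y => decide (y ≤ x))).filter (fun y => decide (y ≤ x - 1)) := by
    rw [List.filter_filter]
    apply List.filter_congr
    intro y _
    by_cases hy : y ≤ x - 1
    · simp [hy]; omega
    · simp [hy]
  rw [h1, List.length_filter_lt_length_iff_exists]
  refine ⟨x, by simp [h], by simp⟩

theorem filt_lt_up (S : List Int) (x : Int) (h : x ∈ S) :
    (S.filter (fun y => decide (x + 1 ≤ y))).length < (S.filter (fun y => decide (x ≤ y))).length := by
  have h1 : S.filter (fun y => decide (x + 1 ≤ y)) =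
      (S.filter (fun y => decide (x ≤ y))).filter (fun y => decide (x + 1 ≤ y)) := by
    rw [List.filter_filter]
    apply List.filter_congr
    intro y _
    by_cases hy : x + 1 ≤ y
    · simp [hy]; omega
    · simp [hy]
  rw [h1, List.length_filter_lt_length_iff_exists]
  refine ⟨x, by simp [h], by simp⟩

-- length of the run x, x-1, x-2, … inside S
def chainDown (S : List Int) (x : Int) : Nat :=
  if h : x ∈ S then chainDown S (x - 1) + 1 else 0
termination_by (S.filter (fun y => decide (y ≤ x))).length
decreasing_by exact filt_lt_down S x h

-- length of the run x, x+1, x+2, … inside S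
def chainUp (S : List Int) (x : Int) : Nat :=
  if h : x ∈ S then chainUp S (x + 1) + 1 else 0
termination_by (S.filter (fun y => decide (x ≤ y))).length
decreasing_by exact filt_lt_up S x h

theorem chainDown_pos {S : List Int} {x : Int} (h : x ∈ S) :
    chainDown S x = chainDown S (x - 1) + 1 := by rw [chainDown]; simp [h]

theorem chainDown_zero {S : List Int} {x : Int} (h : x ∉ S) : chainDown S x = 0 := by
  rw [chainDown]; simp [h]

theorem chainUp_pos {S : List Int} {x : Int} (h : x ∈ S) :
    chainUp S x = chainUp S (x + 1) + 1 := by rw [chainUp]; simp [h]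

theorem chainUp_zero {S : List Int} {x : Int} (h : x ∉ S) : chainUp S x = 0 := by
  rw [chainUp]; simp [h]

theorem chainDown_mem_aux (S : List Int) :
    ∀ (n : Nat) (x : Int), chainDown S x ≤ n → ∀ k < chainDown S x, x - (k : Int) ∈ S := by
  intro n
  induction n with
  | zero => intro x hx k hk; omega
  | succ n ih =>
    intro x hx k hk
    by_cases h : x ∈ S
    · rw [chainDown_pos h] at hk hx
      match k with
      | 0 => simpa using h
      | k + 1 =>
        have := ih (x - 1) (by omega) k (by omega)
        have e : x - ((k : Int) + 1) = x - 1 - k := by ring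
        push_cast
        rw [e]; exact this
    · rw [chainDown_zero h] at hk; omega

theorem chainDown_mem (S : List Int) (x : Int) : ∀ k < chainDown S x, x - (k : Int) ∈ S :=
  chainDown_mem_aux S (chainDown S x) x le_rfl

theorem chainDown_bottom_aux (S : List Int) :
    ∀ (n : Nat) (x : Int), chainDown S x ≤ n → x - (chainDown S x : Int) ∉ S := by
  intro n
  induction n with
  | zero =>
    intro x hx
    have h0 : chainDown S x = 0 := by omega
    by_cases h : x ∈ S
    · rw [chainDown_pos h] at h0; omega
    · simpa [h0] using h
  | succ n ih =>
    intro x hx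
    by_cases h : x ∈ S
    · rw [chainDown_pos h] at hx ⊢
      have := ih (x - 1) (by omega)
      have e : x - (((chainDown S (x - 1) : Int)) + 1) = x - 1 - (chainDown S (x - 1) : Int) := by ring
      push_cast
      rw [e]; exact this
    · simpa [chainDown_zero h] using h

theorem chainDown_bottom (S : List Int) (x : Int) : x - (chainDown S x : Int) ∉ S :=
  chainDown_bottom_aux S (chainDown S x) x le_rfl

theorem chainUp_mem_aux (S : List Int) :
    ∀ (n : Nat) (x : Int), chainUp S x ≤ n → ∀ k < chainUp S x, x + (k : Int) ∈ S := by
  intro n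
  induction n with
  | zero => intro x hx k hk; omega
  | succ n ih =>
    intro x hx k hk
    by_cases h : x ∈ S
    · rw [chainUp_pos h] at hk hx
      match k with
      | 0 => simpa using h
      | k + 1 =>
        have := ih (x + 1) (by omega) k (by omega)
        have e : x + ((k : Int) + 1) = x + 1 + k := by ring
        push_cast
        rw [e]; exact this
    · rw [chainUp_zero h] at hk; omega

theorem chainUp_mem (S : List Int) (x : Int) : ∀ k < chainUp S x, x + (k : Int) ∈ S :=
  chainUp_mem_aux S (chainUp S x) x le_rfl

theorem le_chainUp (S : List Int) :
    ∀ (n : Nat) (x : Int), (∀ k < n, x + (k : Int) ∈ S) → n ≤ chainUp S x := by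
  intro n
  induction n with
  | zero => intro x _; omega
  | succ n ih =>
    intro x h
    have hx : x ∈ S := by simpa using h 0 (by omega)
    rw [chainUp_pos hx]
    have := ih (x + 1) (fun k hk => by
      have := h (k + 1) (by omega)
      have e : x + ((k : Int) + 1) = x + 1 + k := by ring
      push_cast at this
      rwa [e] at this)
    omega

theorem le_chainDown (S : List Int) :
    ∀ (n : Nat) (x : Int), (∀ k < n, x - (k : Int) ∈ S) → n ≤ chainDown S x := by
  intro n
  induction n with
  | zero => intro x _; omega
  | succ n ih =>
    intro x h
    have hx : x ∈ S := by simpa using h 0 (by omega)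
    rw [chainDown_pos hx]
    have := ih (x - 1) (fun k hk => by
      have := h (k + 1) (by omega)
      have e : x - ((k : Int) + 1) = x - 1 - k := by ring
      push_cast at this
      rwa [e] at this)
    omega

theorem chainUp_le_filter (S : List Int) :
    ∀ (n : Nat) (x : Int), (S.filter (fun y => decide (x ≤ y))).length ≤ n →
      chainUp S x ≤ (S.filter (fun y => decide (x ≤ y))).length := by
  intro n
  induction n with
  | zero =>
    intro x hx
    by_cases h : x ∈ S
    · exact absurd (filt_lt_up S x h) (by omega)
    · simp [chainUp_zero h]
  | succ n ih =>
    intro x hx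
    by_cases h : x ∈ S
    · have hlt := filt_lt_up S x h
      have := ih (x + 1) (by omega)
      rw [chainUp_pos h]
      omega
    · simp [chainUp_zero h]

theorem chainUp_le_length (S : List Int) (x : Int) : chainUp S x ≤ S.length := by
  have h := chainUp_le_filter S (S.filter (fun y => decide (x ≤ y))).length x le_rfl
  have := List.length_filter_le (fun y => decide (x ≤ y)) S
  omega

theorem pvExtend_eq (S : List Int) (face : Int) :
    ∀ (fuel : Nat) (length : Int), chainUp S (face + length) ≤ fuel →
      pvExtend S fuel face length = length + (chainUp S (face + length) : Int) := by
  intro fuel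
  induction fuel with
  | zero =>
    intro length h
    have h0 : chainUp S (face + length) = 0 := by omega
    simp [pvExtend, h0]
  | succ n ih =>
    intro length h
    rw [pvExtend]
    by_cases hm : face + length ∈ S
    · rw [if_pos hm]
      have e : face + (length + 1) = face + length + 1 := by ring
      rw [chainUp_pos hm] at h ⊢
      rw [ih (length + 1) (by rw [e]; omega)]
      rw [e]
      push_cast
      ring
    · rw [if_neg hm, chainUp_zero hm]
      simp

-- a bounded running max
theorem foldl_max_le_int {β : Type} (xs : List β) (f : β → Int) (init c : Int)
    (h0 : init ≤ c) (h : ∀ x ∈ xs, f x ≤ c) :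
    xs.foldl (fun acc y => max acc (f y)) init ≤ c := by
  induction xs generalizing init with
  | nil => simpa using h0
  | cons a t ih =>
    simp only [List.foldl_cons]
    exact ih _ (max_le h0 (h a (by simp))) (fun x hx => h x (by simp [hx]))

-- A's scan over the strictly increasing sorted list computes the running max of chainDown
theorem scanA (S : List Int) :
    ∀ (T : List Int) (prev m : Int),
      T.Pairwise (· < ·) → (∀ z ∈ T, z ∈ S) → (∀ z ∈ T, prev < z) →
      (∀ z ∈ S, z ≤ prev ∨ z ∈ T) → prev ∈ S →
      (T.foldl
        (fun (st : Int × Int × Option Int) face =>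
          let cc : Int := match st.2.2 with
            | some p => if face - p = 1 then st.1 + 1 else 1
            | none => 1
          (cc, max st.2.1 cc, some face))
        ((chainDown S prev : Int), m, some prev)).2.1 =
      T.foldl (fun acc y => max acc ((chainDown S y : Int))) m := by
  intro T
  induction T with
  | nil => intro prev m _ _ _ _ _; rfl
  | cons y T' ih =>
    intro prev m hpw hmem hgt hcov hprev
    have hyS : y ∈ S := hmem y (by simp)
    have hcc : (if y - prev = 1 then (chainDown S prev : Int) + 1 else 1) = (chainDown S y : Int) := by
      by_cases hd : y - prev = 1
      · rw [if_pos hd]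
        have : y - 1 = prev := by omega
        rw [chainDown_pos hyS, this]
        push_cast; ring
      · rw [if_neg hd]
        have hnot : y - 1 ∉ S := by
          intro hin
          rcases hcov (y - 1) hin with hle | hT
        -- y - 1 ≤ prev and prev < y force y - 1 = prev, contradicting hd
          · have := hgt y (by simp)
            omega
          · rcases List.mem_cons.mp hT with he | hT'
            · omega
            · have := (List.pairwise_cons.mp hpw).1 (y - 1) hT'
              omega
        rw [chainDown_pos hyS, chainDown_zero hnot]
        simp
    simp only [List.foldl_cons]
    have step : ∀ st : Int × Int × Option Int, st = ((chainDown S prev : Int), m, some prev) →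
        (let cc : Int := match st.2.2 with
          | some p => if y - p = 1 then st.1 + 1 else 1
          | none => 1
        ((cc, max st.2.1 cc, some y) : Int × Int × Option Int)) =
        ((chainDown S y : Int), max m (chainDown S y : Int), some y) := by
      intro st hst; subst hst
      simp only []
      rw [hcc]
    rw [step _ rfl]
    have hpw' := (List.pairwise_cons.mp hpw).2
    have hgt' := (List.pairwise_cons.mp hpw).1
    exact ih y (max m (chainDown S y : Int)) hpw'
      (fun z hz => hmem z (by simp [hz]))
      hgt'
      (fun z hz => by
        rcases hcov z hz with hle | hT
        · left; have := hgt y (by simp); omega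
        · rcases List.mem_cons.mp hT with he | hT'
          · left; omega
          · right; exact hT')
      hyS

-- A equals the running max of chainDown over the sorted distinct faces
theorem sideA (S : List Int) (T : List Int)
    (hpw : T.Pairwise (· < ·)) (hmemTS : ∀ z, z ∈ T ↔ z ∈ S) :
    (T.foldl
      (fun (st : Int × Int × Option Int) face =>
        let cc : Int := match st.2.2 with
          | some p => if face - p = 1 then st.1 + 1 else 1
          | none => 1
        (cc, max st.2.1 cc, some face))
      (0, 0, none)).2.1 =
    T.foldl (fun acc y => max acc ((chainDown S y : Int))) 0 := by
  cases T with
  | nil => rfl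
  | cons t0 T' =>
    have ht0S : t0 ∈ S := (hmemTS t0).mp (by simp)
    have hgt' := (List.pairwise_cons.mp hpw).1
    have hd1 : chainDown S t0 = 1 := by
      have hnot : t0 - 1 ∉ S := by
        intro hin
        rcases List.mem_cons.mp ((hmemTS (t0 - 1)).mpr hin) with he | hT'
        · omega
        · have := hgt' (t0 - 1) hT'
          omega
      rw [chainDown_pos ht0S, chainDown_zero hnot]
    simp only [List.foldl_cons]
    have e1 : ((1 : Int), max 0 1, some t0) =
        ((chainDown S t0 : Int), max 0 (chainDown S t0 : Int), some t0) := by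
      rw [hd1]; norm_num
    rw [e1]
    exact scanA S T' t0 (max 0 (chainDown S t0 : Int)) (List.pairwise_cons.mp hpw).2
      (fun z hz => (hmemTS z).mp (by simp [hz]))
      hgt'
      (fun z hz => by
        rcases List.mem_cons.mp ((hmemTS z).mpr hz) with he | hT'
        · left; omega
        · right; exact hT')
      ht0S

theorem main_eq (cards : List (List (String × Int))) :
    count_continuous_faces cards = count_continuous_faces_alt cards := by
  unfold count_continuous_faces count_continuous_faces_alt
  set S : List Int := PySem.Set.ofList (cards.map pvFace) with hS
  set T : List Int := PySem.List.sorted S (fun x => x) with hT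
  simp only []
  have hpw : T.Pairwise (· < ·) := PySem.List.sorted_ofList_pairwise_lt (cards.map pvFace)
  have hmemTS : ∀ z, z ∈ T ↔ z ∈ S := fun z => (PySem.List.sorted_perm S (fun x => x) false).mem_iff
  -- A's value
  rw [sideA S T hpw hmemTS]
  -- B's value: replace the extension loop by chainUp, then pull the test out as a filter
  have hB : S.foldl
      (fun best face =>
        if face - 1 ∉ S then max best (pvExtend S S.length face 1) else best) 0 =
      (S.filter (fun face => decide (face - 1 ∉ S))).foldl
        (fun best face => max best ((chainUp S face : Int))) 0 := by
    rw [PySem.List.foldl_congr_mem S _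
      (fun best face => if face - 1 ∉ S then max best ((chainUp S face : Int)) else best) 0
      (fun best face hface => by
        show (if face - 1 ∉ S then max best (pvExtend S S.length face 1) else best)
            = (if face - 1 ∉ S then max best ((chainUp S face : Int)) else best)
        by_cases hf : face - 1 ∉ S
        · rw [if_pos hf, if_pos hf]
          have hfuel : chainUp S (face + 1) ≤ S.length := chainUp_le_length S (face + 1)
          rw [pvExtend_eq S face S.length 1 hfuel]
          rw [show (chainUp S face : Int) = 1 + (chainUp S (face + 1) : Int) from by
            rw [chainUp_pos hface]; push_cast; ring]
        · rw [if_neg hf, if_neg hf])]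
    exact PySem.List.foldl_ite_eq_foldl_filter (fun face => face - 1 ∉ S)
      (fun best face => max best ((chainUp S face : Int))) S 0
  rw [hB]
  -- both are the max over all of S of chainDown; prove ≤ both ways
  apply le_antisymm
  · -- A ≤ B
    apply foldl_max_le_int
    · exact (PySem.List.le_foldl_max_int _ _ 0).1
    · intro x hxT
      have hxS : x ∈ S := (hmemTS x).mp hxT
      set c : Nat := chainDown S x with hc
      have hc1 : 1 ≤ c := by rw [hc, chainDown_pos hxS]; omega
      set s : Int := x - (c : Int) + 1 with hs
      have hsS : s ∈ S := by
        have := chainDown_mem S x (c - 1) (by omega)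
        have e : x - ((c - 1 : Nat) : Int) = s := by rw [hs]; omega
        rwa [e] at this
      have hsstart : s - 1 ∉ S := by
        have := chainDown_bottom S x
        have e : s - 1 = x - (c : Int) := by rw [hs]; ring
        rwa [← e] at this
      have hcu : c ≤ chainUp S s := by
        apply le_chainUp S c s
        intro k hk
        have := chainDown_mem S x (c - 1 - k) (by omega)
        have e : x - ((c - 1 - k : Nat) : Int) = s + (k : Int) := by rw [hs]; omega
        rwa [e] at this
      have hmem : s ∈ S.filter (fun face => decide (face - 1 ∉ S)) := by
        rw [List.mem_filter]
        exact ⟨hsS, by simpa using hsstart⟩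
      have := (PySem.List.le_foldl_max_int (S.filter (fun face => decide (face - 1 ∉ S)))
        (fun face => (chainUp S face : Int)) 0).2 s hmem
      have : (c : Int) ≤ (S.filter (fun face => decide (face - 1 ∉ S))).foldl
          (fun best face => max best ((chainUp S face : Int))) 0 := by
        calc (c : Int) ≤ (chainUp S s : Int) := by exact_mod_cast hcu
          _ ≤ _ := this
      exact this
  · -- B ≤ A
    apply foldl_max_le_int
    · exact (PySem.List.le_foldl_max_int _ _ 0).1
    · intro s hsF
      rw [List.mem_filter] at hsF
      have hsS : s ∈ S := hsF.1
      set L : Nat := chainUp S s with hL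
      have hL1 : 1 ≤ L := by rw [hL, chainUp_pos hsS]; omega
      set top : Int := s + (L : Int) - 1 with htop
      have htopS : top ∈ S := by
        have := chainUp_mem S s (L - 1) (by omega)
        have e : s + ((L - 1 : Nat) : Int) = top := by rw [htop]; omega
        rwa [e] at this
      have hLd : L ≤ chainDown S top := by
        apply le_chainDown S L top
        intro k hk
        have := chainUp_mem S s (L - 1 - k) (by omega)
        have e : s + ((L - 1 - k : Nat) : Int) = top - (k : Int) := by rw [htop]; omega
        rwa [e] at this
      have htopT : top ∈ T := (hmemTS top).mpr htopS
      have hA := (PySem.List.le_foldl_max_int T (fun y => (chainDown S y : Int)) 0).2 top htopT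
      calc ((chainUp S s : Nat) : Int) ≤ (chainDown S top : Int) := by exact_mod_cast hLd
        _ ≤ _ := hA

-- ===== VERDICT (by name: the statement is the Claim_ definition above) =====
theorem count_continuous_faces_spec : Claim_equal_count_continuous_faces := by
  intro cards _ _
  unfold Spec_count_continuous_faces
  exact main_eq cards
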